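-- pv_equiv track=rewrite | github.com/HEUOpenResource/HEUOpenResource.github.io | allContributors.py | dump_allcontributors
-- ===== SOURCE A (Python) =====
-- def dump_allcontributors(github_users, extra_github_users, extra_non_github):
--     seen = set()
--     lines = ["allcontributors:"]
--
--     # 1️⃣ GitHub commit 用户（最早 → 最晚）
--     for u in github_users:
--         if u not in seen:
--             lines.append(f"  - {u}")
--             seen.add(u)
--
--     # 2️⃣ contributors.json 中的 GitHub 用户（补充）
--     for u in extra_github_users:
--         if u not in seen:
--             lines.append(f"  - {u}")
--             seen.add(u)
--
--     # 3️⃣ 非 GitHub 用户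
--     for c in extra_non_github:
--         lines.append(f"  - name: {c['name']}")
--         lines.append(f"    avatar: {c['avatar']}")
--         lines.append(f"    url: {c['url']}")
--
--     return "\n".join(lines)
-- ===== SOURCE B (Python) =====
-- def dump_allcontributors(github_users, extra_github_users, extra_non_github):
--     # filter-nub: repeatedly take the front user and delete all its later duplicates,
--     # so no seen-set is ever maintained
--     lines = ["allcontributors:"]
--     users = github_users + extra_github_users
--     while users:
--         head = users[0]
--         lines.append("  - " + head)
--         users = [u for u in users[1:] if u != head]
--     for c in extra_non_github:
--         lines.append(f"  - name: {c['name']}")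
--         lines.append(f"    avatar: {c['avatar']}")
--         lines.append(f"    url: {c['url']}")
--     return "\n".join(lines)
-- ===== Notes on version B (the rewrite author's own statement) =====
-- stated objective: alternative
-- what changed: Replaces A's seen-set membership-test dedup with a filter-nub: a while loop that emits the front user and rebuilds the remaining worklist with all duplicates of that user filtered out, so no seen-set exists at all.
-- outside the precondition, e.g. on dump_allcontributors([], [], [{'name': 'X', 'url': 'Y'}]): A raises KeyError, B raises KeyError
import Mathlib
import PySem

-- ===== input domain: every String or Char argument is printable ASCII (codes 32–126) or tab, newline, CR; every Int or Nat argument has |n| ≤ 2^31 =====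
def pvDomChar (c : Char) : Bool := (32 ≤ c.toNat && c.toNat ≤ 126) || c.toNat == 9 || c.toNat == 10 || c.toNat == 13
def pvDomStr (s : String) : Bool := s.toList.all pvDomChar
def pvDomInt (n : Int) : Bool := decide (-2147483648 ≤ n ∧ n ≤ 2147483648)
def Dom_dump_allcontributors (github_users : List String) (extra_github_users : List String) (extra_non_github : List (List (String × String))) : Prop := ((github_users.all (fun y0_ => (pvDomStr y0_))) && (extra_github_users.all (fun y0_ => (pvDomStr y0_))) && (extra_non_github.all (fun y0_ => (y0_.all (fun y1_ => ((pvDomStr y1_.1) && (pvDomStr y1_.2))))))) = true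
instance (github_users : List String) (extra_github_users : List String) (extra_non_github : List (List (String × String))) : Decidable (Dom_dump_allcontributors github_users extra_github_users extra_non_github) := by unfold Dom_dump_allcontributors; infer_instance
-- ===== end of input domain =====

-- B replaces A's seen-set dedup with a filter-nub worklist loop (objective: alternative).

-- ===== PORT A =====
-- the body of A's two dedup loops: 'if u not in seen: lines.append(f"  - {u}"); seen.add(u)'
def pvStepA (st : PySem.Set String × List String) (u : String) : PySem.Set String × List String :=
  if PySem.Set.contains st.1 u then st
  else (PySem.Set.add st.1 u, st.2 ++ ["  - " ++ u])

-- three lines for one non-github contributor; .getD "" is unreachable under Pre_ (KeyError excluded)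
def pvNonGithubLines (c : List (String × String)) : List String :=
  ["  - name: " ++ ((PySem.Dict.ofList c).get? "name").getD "",
   "    avatar: " ++ ((PySem.Dict.ofList c).get? "avatar").getD "",
   "    url: " ++ ((PySem.Dict.ofList c).get? "url").getD ""]

def dump_allcontributors (github_users : List String) (extra_github_users : List String) (extra_non_github : List (List (String × String))) : String :=
  let st0 : PySem.Set String × List String := (PySem.Set.empty, ["allcontributors:"])
  let st1 := github_users.foldl pvStepA st0
  let st2 := extra_github_users.foldl pvStepA st1
  let lines := extra_non_github.foldl (fun ls c => ls ++ pvNonGithubLines c) st2.2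
  PySem.Str.join "\n" lines

-- ===== PORT B =====
-- B's while loop: emit the front user, filter all its duplicates out of the worklist
def pvUserLoop (lines : List String) (users : List String) : List String :=
  match users with
  | [] => lines
  | head :: rest =>
      pvUserLoop (lines ++ ["  - " ++ head]) (rest.filter (fun u => u != head))
termination_by users.length
decreasing_by
  simp
  exact List.length_filter_le _ _

def dump_allcontributors_alt (github_users : List String) (extra_github_users : List String) (extra_non_github : List (List (String × String))) : String :=
  let lines0 := pvUserLoop ["allcontributors:"] (github_users ++ extra_github_users)
  let lines := extra_non_github.foldl (fun ls c => ls ++ pvNonGithubLines c) lines0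
  PySem.Str.join "\n" lines

-- ===== PRECONDITION & SPEC =====
-- Pre_ excludes inputs where a non-github contributor dict lacks 'name', 'avatar' or 'url': there A raises KeyError (and B raises too).
def Pre_dump_allcontributors (_github_users : List String) (_extra_github_users : List String) (extra_non_github : List (List (String × String))) : Prop :=
  ∀ c ∈ extra_non_github, "name" ∈ c.map Prod.fst ∧ "avatar" ∈ c.map Prod.fst ∧ "url" ∈ c.map Prod.fst
instance (github_users : List String) (extra_github_users : List String) (extra_non_github : List (List (String × String))) : Decidable (Pre_dump_allcontributors github_users extra_github_users extra_non_github) := by unfold Pre_dump_allcontributors; infer_instance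

def pvWitness_dump_allcontributors : List String × List String × (List (List (String × String))) :=
  (["alice", "bob", "alice"], ["bob", "carol"], [[("name", "Dan"), ("avatar", "http://a"), ("url", "http://u")]])

def Spec_dump_allcontributors (github_users : List String) (extra_github_users : List String) (extra_non_github : List (List (String × String))) (out : String) : Prop := out = dump_allcontributors_alt github_users extra_github_users extra_non_github
instance (github_users : List String) (extra_github_users : List String) (extra_non_github : List (List (String × String))) (out : String) : Decidable (Spec_dump_allcontributors github_users extra_github_users extra_non_github out) := by unfold Spec_dump_allcontributors; infer_instance

-- ===== CLAIM =====
def Claim_equal_dump_allcontributors : Prop := ∀ (github_users : List String) (extra_github_users : List String) (extra_non_github : List (List (String × String))), Dom_dump_allcontributors github_users extra_github_users extra_non_github → Pre_dump_allcontributors github_users extra_github_users extra_non_github → Spec_dump_allcontributors github_users extra_github_users extra_non_github (dump_allcontributors github_users extra_github_users extra_non_github)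

-- ===== LEMMAS AND PROOFS =====

-- A's dedup loop keeps the invariant: lines = header :: seen.map ("  - " ++ ·)
theorem pvStepA_invariant (xs : List String) : ∀ (seen : PySem.Set String),
    xs.foldl pvStepA (seen, "allcontributors:" :: seen.map (fun u => "  - " ++ u))
      = (PySem.Set.update seen xs,
         "allcontributors:" :: (PySem.Set.update seen xs).map (fun u => "  - " ++ u)) := by
  induction xs with
  | nil => intro seen; simp [PySem.Set.update]
  | cons x xs ih =>
    intro seen
    by_cases h : PySem.Set.contains seen x
    · have hadd : PySem.Set.add seen x = seen := by simp only [PySem.Set.add, h, if_true]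
      simp only [List.foldl_cons, pvStepA, h, if_true, PySem.Set.update, List.foldl_cons, hadd]
      exact ih seen
    · have hadd : PySem.Set.add seen x = seen ++ [x] := by simp only [PySem.Set.add, h, if_false, Bool.false_eq_true]
      simp only [List.foldl_cons, pvStepA, h, PySem.Set.update, List.foldl_cons]
      have := ih (PySem.Set.add seen x)
      simp only [PySem.Set.update] at this
      rw [← this, hadd]
      simp

-- the filter-nub sequence B traverses
def pvNub (users : List String) : List String :=
  match users with
  | [] => []
  | head :: rest => head :: pvNub (rest.filter (fun u => u != head))
termination_by users.length
decreasing_by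
  simp
  exact List.length_filter_le _ _

theorem pvUserLoop_eq (n : Nat) : ∀ (users : List String), users.length ≤ n → ∀ (lines : List String),
    pvUserLoop lines users = lines ++ (pvNub users).map (fun u => "  - " ++ u) := by
  induction n with
  | zero =>
    intro users h lines
    have : users = [] := List.eq_nil_of_length_eq_zero (Nat.le_zero.mp h)
    subst this; simp [pvUserLoop, pvNub]
  | succ n ih =>
    intro users h lines
    cases users with
    | nil => simp [pvUserLoop, pvNub]
    | cons head rest =>
      simp only [List.length_cons, Nat.succ_le_succ_iff] at h
      rw [pvUserLoop, pvNub,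
        ih _ (le_trans (List.length_filter_le _ _) h)]
      simp

-- B's filter-nub sequence is exactly A's seen-set dedup
theorem update_eq_nub_filter (n : Nat) : ∀ (xs : List String), xs.length ≤ n → ∀ (seen : PySem.Set String),
    PySem.Set.update seen xs = seen ++ pvNub (xs.filter (fun u => !(PySem.Set.contains seen u))) := by
  induction n with
  | zero =>
    intro xs hxs seen
    have : xs = [] := List.eq_nil_of_length_eq_zero (Nat.le_zero.mp hxs)
    subst this; simp [PySem.Set.update, pvNub]
  | succ n ih =>
    intro xs hxs seen
    cases xs with
    | nil => simp [PySem.Set.update, pvNub]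
    | cons x xs =>
      simp only [List.length_cons, Nat.succ_le_succ_iff] at hxs
      simp only [PySem.Set.update, List.foldl_cons]
      by_cases h : PySem.Set.contains seen x
      · have hadd : PySem.Set.add seen x = seen := by simp only [PySem.Set.add, h, if_true]
        rw [hadd]
        have := ih xs hxs seen
        simp only [PySem.Set.update] at this
        rw [this]
        have hx : x ∈ seen := by simpa [PySem.Set.contains] using h
        simp [hx]
      · have hadd : PySem.Set.add seen x = seen ++ [x] := by
          simp only [PySem.Set.add, h, if_false, Bool.false_eq_true]
        have hlen : (xs.filter (fun u => !(PySem.Set.contains seen u))).length ≤ n :=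
          le_trans (List.length_filter_le _ _) hxs
        have := ih xs hxs (PySem.Set.add seen x)
        simp only [PySem.Set.update] at this
        rw [this, hadd, List.filter_cons]
        simp only [h, Bool.not_false, if_true]
        rw [pvNub]
        have hfilt : xs.filter (fun u => !(PySem.Set.contains (seen ++ [x]) u))
            = (xs.filter (fun u => !(PySem.Set.contains seen u))).filter (fun u => u != x) := by
          rw [List.filter_filter]
          apply List.filter_congr
          intro u _
          by_cases hux : u = x
          · simp [hux, PySem.Set.contains]
          · simp [PySem.Set.contains, hux]
        rw [hfilt]
        simp

-- ===== VERDICT =====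
theorem dump_allcontributors_spec : Claim_equal_dump_allcontributors := by
  intro gu egu eng _ _
  unfold Spec_dump_allcontributors dump_allcontributors dump_allcontributors_alt
  show PySem.Str.join "\n"
      (eng.foldl (fun ls c => ls ++ pvNonGithubLines c)
        (egu.foldl pvStepA (gu.foldl pvStepA
          ((PySem.Set.empty : PySem.Set String),
           "allcontributors:" :: (PySem.Set.empty : PySem.Set String).map (fun u => "  - " ++ u)))).2)
    = _
  rw [pvStepA_invariant gu PySem.Set.empty,
      pvStepA_invariant egu (PySem.Set.update PySem.Set.empty gu)]
  have hupd : PySem.Set.update (PySem.Set.update PySem.Set.empty gu) egu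
      = PySem.Set.update PySem.Set.empty (gu ++ egu) := by
    simp [PySem.Set.update, List.foldl_append]
  rw [hupd]
  have := update_eq_nub_filter (gu ++ egu).length (gu ++ egu) le_rfl PySem.Set.empty
  have hfilter : (gu ++ egu).filter (fun u => !(PySem.Set.contains PySem.Set.empty u)) = gu ++ egu := by
    simp [PySem.Set.empty, PySem.Set.contains]
  rw [hfilter] at this
  rw [this, pvUserLoop_eq (gu ++ egu).length _ le_rfl]
  simp [PySem.Set.empty]
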